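-- pv_equiv track=rewrite | github.com/WrathofBhuvan11/Delta_N-1_Cache_compression | delta_cache_image_test.py | verify_reconstruction
-- ===== SOURCE A (Python) =====
-- def byte_add(a, b):
--     return [(a[i] + b[i]) & 0xFF for i in range(len(a))]
--
-- def byte_xor(a, b):
--     return [a[i] ^ b[i] for i in range(len(a))]
--
-- def verify_reconstruction(original, delta, bases, mode='sub'):
--     result = list(delta)
--     for base in bases:
--         if mode == 'sub':
--             result = byte_add(result, base)
--         else:
--             result = byte_xor(result, base)
--     return result == original
-- ===== SOURCE B (Python) =====
-- def verify_reconstruction(original, delta, bases, mode='sub'):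
--     if len(original) != len(delta):
--         return False
--     if mode == 'sub':
--         for i, d in enumerate(delta):
--             v = d
--             for base in bases:
--                 v = (v + base[i]) & 0xFF
--             if v != original[i]:
--                 return False
--     else:
--         for i, d in enumerate(delta):
--             v = d
--             for base in bases:
--                 v ^= base[i]
--             if v != original[i]:
--                 return False
--     return True
-- ===== Notes on version B (the rewrite author's own statement) =====
-- stated objective: alternative
-- what changed: B verifies column-by-column with the mode branch hoisted out of the loops, a length pre-check, and early exit at the first mismatching byte, instead of A's folding of whole reconstructed vectors base-by-base followed by a full list comparison; no intermediate lists are built.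
import Mathlib
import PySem

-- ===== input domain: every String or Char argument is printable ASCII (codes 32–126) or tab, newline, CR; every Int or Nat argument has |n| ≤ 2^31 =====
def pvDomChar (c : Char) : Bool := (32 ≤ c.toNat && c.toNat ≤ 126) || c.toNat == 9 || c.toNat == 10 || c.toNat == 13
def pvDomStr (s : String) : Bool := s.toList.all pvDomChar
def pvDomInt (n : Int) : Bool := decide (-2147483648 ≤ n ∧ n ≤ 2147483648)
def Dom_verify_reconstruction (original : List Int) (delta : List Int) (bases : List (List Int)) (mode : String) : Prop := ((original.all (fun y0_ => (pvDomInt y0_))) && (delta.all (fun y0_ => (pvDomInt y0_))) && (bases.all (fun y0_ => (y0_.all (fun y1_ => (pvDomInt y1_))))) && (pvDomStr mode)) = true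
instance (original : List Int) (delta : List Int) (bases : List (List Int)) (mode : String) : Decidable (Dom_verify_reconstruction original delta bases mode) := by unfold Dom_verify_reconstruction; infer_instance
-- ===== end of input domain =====

-- B verifies column-by-column with the mode branch hoisted and early exit, instead of A's base-by-base vector folding (alternative decomposition, same cost).


-- ===== PORT A =====
-- byte_add: indices are the nonnegative 0..len(a)-1, so List.range/getD is exact where Python does not raise
def pvByteAdd (a b : List Int) : List Int :=
  (List.range a.length).map (fun i => PySem.Int.band (a.getD i 0 + b.getD i 0) 255)

def pvByteXor (a b : List Int) : List Int :=
  (List.range a.length).map (fun i => PySem.Int.bxor (a.getD i 0) (b.getD i 0))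

def verify_reconstruction (original : List Int) (delta : List Int) (bases : List (List Int)) (mode : String) : Bool :=
  let result := bases.foldl
    (fun result base => if mode == "sub" then pvByteAdd result base else pvByteXor result base)
    delta
  result == original

-- ===== PORT B =====
-- inner loop over bases at one byte position i
def pvColSub (bases : List (List Int)) (i : Nat) (d : Int) : Int :=
  bases.foldl (fun v base => PySem.Int.band (v + base.getD i 0) 255) d

def pvColXor (bases : List (List Int)) (i : Nat) (d : Int) : Int :=
  bases.foldl (fun v base => PySem.Int.bxor v (base.getD i 0)) d

def verify_reconstruction_alt (original : List Int) (delta : List Int) (bases : List (List Int)) (mode : String) : Bool :=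
  if original.length ≠ delta.length then false
  else if mode == "sub" then
    (List.range delta.length).all (fun i => pvColSub bases i (delta.getD i 0) == original.getD i 0)
  else
    (List.range delta.length).all (fun i => pvColXor bases i (delta.getD i 0) == original.getD i 0)

-- ===== PRECONDITION & SPEC =====
-- Pre_ excludes exactly the inputs where Python A raises IndexError: a nonempty delta with some base shorter than delta.
def Pre_verify_reconstruction (original : List Int) (delta : List Int) (bases : List (List Int)) (mode : String) : Prop :=
  delta = [] ∨ ∀ base ∈ bases, delta.length ≤ base.length
instance (original : List Int) (delta : List Int) (bases : List (List Int)) (mode : String) : Decidable (Pre_verify_reconstruction original delta bases mode) := by unfold Pre_verify_reconstruction; infer_instance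

def pvWitness_verify_reconstruction : List Int × List Int × List (List Int) × String :=
  ([5, 7], [3, 2], [[2, 5], [0, 0]], "sub")

def Spec_verify_reconstruction (original : List Int) (delta : List Int) (bases : List (List Int)) (mode : String) (out : Bool) : Prop := out = verify_reconstruction_alt original delta bases mode
instance (original : List Int) (delta : List Int) (bases : List (List Int)) (mode : String) (out : Bool) : Decidable (Spec_verify_reconstruction original delta bases mode out) := by unfold Spec_verify_reconstruction; infer_instance

-- ===== CLAIM (what is proved, stated in full; the proofs are below) =====
def Claim_equal_verify_reconstruction : Prop := ∀ (original : List Int) (delta : List Int) (bases : List (List Int)) (mode : String), Dom_verify_reconstruction original delta bases mode → Pre_verify_reconstruction original delta bases mode → Spec_verify_reconstruction original delta bases mode (verify_reconstruction original delta bases mode)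

-- ===== LEMMAS AND PROOFS =====

-- loop interchange: folding whole vectors with an elementwise map equals, per position, folding that column
theorem pv_interchange (g : Int → Int → Int) (bs : List (List Int)) (cur : List Int) :
    bs.foldl (fun r base => (List.range r.length).map (fun i => g (r.getD i 0) (base.getD i 0))) cur
    = (List.range cur.length).map (fun i => bs.foldl (fun v base => g v (base.getD i 0)) (cur.getD i 0)) := by
  induction bs generalizing cur with
  | nil =>
    simp only [List.foldl_nil]
    apply List.ext_getElem (by simp)
    intro i h1 h2
    simp only [List.getElem_map, List.getElem_range]
    rw [List.getD_eq_getElem _ _ h1]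
  | cons base bs ih =>
    simp only [List.foldl_cons]
    rw [ih]
    have hlen : ((List.range cur.length).map
        (fun i => g (cur.getD i 0) (base.getD i 0))).length = cur.length := by simp
    rw [hlen]
    apply List.map_congr_left
    intro i hi
    have hi' : i < cur.length := List.mem_range.mp hi
    congr 1
    rw [List.getD_eq_getElem _ _ (by simpa using hi')]
    simp [List.getD_eq_getElem _ _ hi']

theorem pv_beq_map (f : Nat → Int) (n : Nat) (original : List Int) :
    ((List.range n).map f == original) =
      (if original.length ≠ n then false
       else (List.range n).all (fun i => f i == original.getD i 0)) := by
  split_ifs with h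
  · rw [beq_eq_false_iff_ne]
    intro hEq
    exact h (by simpa using congrArg List.length hEq.symm)
  · push_neg at h
    rw [Bool.eq_iff_iff, beq_iff_eq, List.all_eq_true]
    constructor
    · intro hEq i hi
      have hi' : i < n := List.mem_range.mp hi
      have := congrArg (fun l => l.getD i (0 : Int)) hEq
      simp only at this
      rw [List.getD_eq_getElem _ _ (by simp [hi']), List.getElem_map, List.getElem_range] at this
      exact beq_iff_eq.mpr (by rw [this])
    · intro hall
      apply List.ext_getElem (by simp [h])
      intro i h1 h2
      have := beq_iff_eq.mp (hall i (List.mem_range.mpr (by simpa using h1)))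
      rw [List.getElem_map, List.getElem_range, this, List.getD_eq_getElem _ _ h2]

-- ===== VERDICT (by name: the statement is the Claim_ definition above) =====
theorem verify_reconstruction_spec : Claim_equal_verify_reconstruction := by
  intro original delta bases mode _ _
  unfold Spec_verify_reconstruction verify_reconstruction verify_reconstruction_alt
  by_cases hm : (mode == "sub") = true
  · simp only [hm, if_true, pvByteAdd]
    rw [pv_interchange (fun v x => PySem.Int.band (v + x) 255) bases delta,
        pv_beq_map _ delta.length original]
    simp only [pvColSub]
  · simp only [hm, Bool.false_eq_true, if_false, pvByteXor]
    rw [pv_interchange (fun v x => PySem.Int.bxor v x) bases delta,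
        pv_beq_map _ delta.length original]
    simp only [pvColXor]
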